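-- pv_equiv track=rewrite | github.com/johpaz/cli-rust-turbo-quant | Nemotron-Cascade-30B/assets/solutions/icpcwf2025/h.py | dp_tight_max
-- ===== SOURCE A (Python) =====
-- INF_NEG = -10 ** 9          # sufficiently small for DP values
--
-- def dp_tight_max(digits, target_set, g):
--     """
--     digit DP with upper bound given by digits list (most significant first)
--     target_set – set of digits that count (for digit 6 it is {6,9})
--     return maximal count of those digits among numbers ≤ bound,
--            remainder 0 (multiple of g).  Return None if no such number.
--     """
--     L = len(digits)
--     dp = [[INF_NEG] * g for _ in range(2)]          # dp[tight][rem]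
--     # first digit, cannot be zero
--     max_digit = digits[0]
--     for d in range(1, max_digit + 1):
--         rem = d % g
--         cnt = 1 if d in target_set else 0
--         tight = 1 if d == max_digit else 0
--         if cnt > dp[tight][rem]:
--             dp[tight][rem] = cnt
--
--     # remaining positions
--     for pos in range(1, L):
--         ndp = [[INF_NEG] * g for _ in range(2)]
--         max_digit = digits[pos]
--         for tight in (0, 1):
--             limit = max_digit if tight else 9
--             for rem in range(g):
--                 cur = dp[tight][rem]
--                 if cur < 0:
--                     continue
--                 for dig in range(limit + 1):
--                     new_rem = (rem * 10 + dig) % g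
--                     new_tight = 1 if (tight == 1 and dig == limit) else 0
--                     new_cnt = cur + (1 if dig in target_set else 0)
--                     if new_cnt > ndp[new_tight][new_rem]:
--                         ndp[new_tight][new_rem] = new_cnt
--         dp = ndp
--
--     best = max(dp[0][0], dp[1][0])
--     return best if best >= 0 else None
-- ===== SOURCE B (Python) =====
-- def dp_tight_max(digits, target_set, g):
--     """
--     Different decomposition: precompute backward "free suffix" tables
--     (no tight dimension), then walk the bound's digit prefix once,
--     branching strictly below the bound at each position.
--     """
--     L = len(digits)
--     # tables[k][r] = best count of target digits over k free digits (each 0..9)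
--     # reaching total remainder 0 when entered with remainder r; None if impossible
--     prev = [0 if r == 0 else None for r in range(g)]
--     tables = [prev]
--     for _ in range(L - 1):
--         cur = []
--         for r in range(g):
--             best = None
--             for d in range(10):
--                 v = prev[(r * 10 + d) % g]
--                 if v is not None:
--                     v += 1 if d in target_set else 0
--                     if best is None or v > best:
--                         best = v
--             cur.append(best)
--         tables.append(cur)
--         prev = cur
--     # walk the tight prefix of the bound; branch strictly below at each position
--     best = None
--     cnt = 0
--     rem = 0
--     for p in range(L):
--         lo = 1 if p == 0 else 0
--         for d in range(lo, digits[p]):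
--             v = tables[L - p - 1][(rem * 10 + d) % g]
--             if v is not None:
--                 v += cnt + (1 if d in target_set else 0)
--                 if best is None or v > best:
--                     best = v
--         if digits[p] < lo:
--             return best
--         cnt += 1 if digits[p] in target_set else 0
--         rem = (rem * 10 + digits[p]) % g
--     if rem == 0 and (best is None or cnt > best):
--         best = cnt
--     return best
-- ===== Notes on version B (the rewrite author's own statement) =====
-- stated objective: alternative
-- what changed: Replaces the forward (tight, remainder) DP table by a different decomposition: precomputed backward free-suffix tables (best count of target digits over k unconstrained digits per entering remainder, no tight dimension) plus a single forward walk along the bound's digits that branches strictly below the bound at each position and finally considers the bound itself.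
import Mathlib
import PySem

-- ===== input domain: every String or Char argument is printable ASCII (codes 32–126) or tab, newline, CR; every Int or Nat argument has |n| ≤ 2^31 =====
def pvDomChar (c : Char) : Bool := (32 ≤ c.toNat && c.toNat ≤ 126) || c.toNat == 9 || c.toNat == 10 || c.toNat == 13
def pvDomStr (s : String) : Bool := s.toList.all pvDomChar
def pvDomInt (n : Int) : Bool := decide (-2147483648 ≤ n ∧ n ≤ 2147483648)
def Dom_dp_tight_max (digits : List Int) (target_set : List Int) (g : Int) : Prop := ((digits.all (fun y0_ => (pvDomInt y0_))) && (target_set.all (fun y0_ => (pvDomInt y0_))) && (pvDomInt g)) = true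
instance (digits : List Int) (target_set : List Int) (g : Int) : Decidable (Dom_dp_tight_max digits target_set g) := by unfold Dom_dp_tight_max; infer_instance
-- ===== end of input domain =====

-- A and B agree on every input A accepts (digits nonempty, g ≥ 1).  B is a different
-- decomposition: backward free-suffix tables (no tight dimension) plus one walk along the
-- bound's digits that branches strictly below the bound at each position.

-- ===== PORT A =====
-- dp[tight][rem] table access; indices are in range and nonnegative on every Pre_ input
def pvGet2 (dp : List (List Int)) (t r : Int) : Int :=
  (dp.getD t.toNat []).getD r.toNat (-1000000000)

def pvSet2 (dp : List (List Int)) (t r v : Int) : List (List Int) :=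
  dp.set t.toNat ((dp.getD t.toNat []).set r.toNat v)

-- first digit, cannot be zero (the loop 'for d in range(1, max_digit+1)')
def pvAFirst (digits : List Int) (target_set : List Int) (g : Int) : List (List Int) :=
  let maxd := digits.getD 0 0        -- digits[0]; in range under Pre_
  (PySem.List.pyRange 1 (maxd + 1) 1).foldl (fun dp d =>
    let rem := PySem.Int.mod d g
    let cnt : Int := if d ∈ target_set then 1 else 0
    let tight : Int := if d = maxd then 1 else 0
    if cnt > pvGet2 dp tight rem then pvSet2 dp tight rem cnt else dp)
    [List.replicate g.toNat (-1000000000), List.replicate g.toNat (-1000000000)]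

-- body of 'for pos in range(1, L)'
def pvAStep (digits : List Int) (target_set : List Int) (g : Int)
    (dp : List (List Int)) (pos : Int) : List (List Int) :=
  let maxd := digits.getD pos.toNat 0       -- digits[pos]; in range for pos produced by the loop
  [(0 : Int), 1].foldl (fun ndp tight =>
    let limit := if tight = 1 then maxd else 9
    (PySem.List.pyRange 0 g 1).foldl (fun ndp rem =>
      let cur := pvGet2 dp tight rem
      if cur < 0 then ndp else
      (PySem.List.pyRange 0 (limit + 1) 1).foldl (fun ndp dig =>
        let nr := PySem.Int.mod (rem * 10 + dig) g
        let nt : Int := if tight = 1 ∧ dig = limit then 1 else 0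
        let nc := cur + (if dig ∈ target_set then 1 else 0)
        if nc > pvGet2 ndp nt nr then pvSet2 ndp nt nr nc else ndp) ndp) ndp)
    [List.replicate g.toNat (-1000000000), List.replicate g.toNat (-1000000000)]

def dp_tight_max (digits : List Int) (target_set : List Int) (g : Int) : Option Int :=
  let dpF := (PySem.List.pyRange 1 (digits.length : Int) 1).foldl
    (pvAStep digits target_set g) (pvAFirst digits target_set g)
  let best := max (pvGet2 dpF 0 0) (pvGet2 dpF 1 0)
  if best ≥ 0 then some best else none

-- ===== PORT B =====
-- 'if v is not None: v += c; if best is None or v > best: best = v'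
def pvBUpd (b : Option Int) (c : Int) (t : Option Int) : Option Int :=
  match t with
  | none => b
  | some v =>
    let v2 := v + c
    match b with
    | none => some v2
    | some bb => if v2 > bb then some v2 else b

-- inner 'for d in range(10)' loop building one table entry
def pvBRow (target_set : List Int) (g : Int) (prev : List (Option Int)) (r : Int) : Option Int :=
  (PySem.List.pyRange 0 10 1).foldl (fun b d =>
    pvBUpd b (if d ∈ target_set then 1 else 0)
      (prev.getD (PySem.Int.mod (r * 10 + d) g).toNat none)) none   -- prev[(r*10+d)%g]; index in range (0 ≤ mod < g)

-- 'cur = []; for r in range(g): ... cur.append(best)'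
def pvBBuild (target_set : List Int) (g : Int) (prev : List (Option Int)) : List (Option Int) :=
  (PySem.List.pyRange 0 g 1).map (pvBRow target_set g prev)

-- 'prev = [...]; tables = [prev]; for _ in range(L-1): cur = build(prev); tables.append(cur); prev = cur'
def pvBTables (target_set : List Int) (g : Int) (L : Int) : List (List (Option Int)) :=
  let base : List (Option Int) := (PySem.List.pyRange 0 g 1).map (fun r => if r = (0 : Int) then some (0 : Int) else none)
  ((PySem.List.pyRange 0 (L - 1) 1).foldl (fun acc _ =>
      let cur := pvBBuild target_set g acc.1
      (cur, acc.2 ++ [cur])) (base, [base])).2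

-- 'for p in range(L): ...' with early 'return best'; tables[L-p-1] is tables[len(remaining suffix)]
def pvBWalk (target_set : List Int) (g : Int) (tables : List (List (Option Int))) :
    List Int → Int → Option Int → Int → Int → Option Int
  | [], _, best, cnt, rem =>
      if rem = 0 then
        match best with
        | none => some cnt
        | some bb => if cnt > bb then some cnt else best
      else best
  | m :: suf, p, best, cnt, rem =>
      let lo : Int := if p = 0 then 1 else 0
      let T := tables.getD suf.length []          -- tables[L - p - 1]; in range under Pre_
      let best' := (PySem.List.pyRange lo m 1).foldl (fun b d =>
          pvBUpd b (cnt + (if d ∈ target_set then 1 else 0))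
            (T.getD (PySem.Int.mod (rem * 10 + d) g).toNat none)) best
      if m < lo then best'
      else pvBWalk target_set g tables suf (p + 1) best'
            (cnt + (if m ∈ target_set then 1 else 0)) (PySem.Int.mod (rem * 10 + m) g)

def dp_tight_max_alt (digits : List Int) (target_set : List Int) (g : Int) : Option Int :=
  pvBWalk target_set g (pvBTables target_set g (digits.length : Int)) digits 0 none 0 0

-- ===== PRECONDITION & SPEC =====
-- Pre_ is exactly where the Python A returns: on digits = [] it raises IndexError, and for
-- g ≤ 0 it raises ZeroDivisionError or IndexError (empty rows).
def Pre_dp_tight_max (digits : List Int) (target_set : List Int) (g : Int) : Prop :=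
  digits ≠ [] ∧ 1 ≤ g
instance (digits : List Int) (target_set : List Int) (g : Int) : Decidable (Pre_dp_tight_max digits target_set g) := by unfold Pre_dp_tight_max; infer_instance

def pvWitness_dp_tight_max : List Int × List Int × Int := ([1, 2], [6, 9], 3)

def Spec_dp_tight_max (digits : List Int) (target_set : List Int) (g : Int) (out : Option Int) : Prop := out = dp_tight_max_alt digits target_set g
instance (digits : List Int) (target_set : List Int) (g : Int) (out : Option Int) : Decidable (Spec_dp_tight_max digits target_set g out) := by unfold Spec_dp_tight_max; infer_instance

-- ===== CLAIM (what is proved, stated in full; the proofs are below) =====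
def Claim_equal_dp_tight_max : Prop := ∀ (digits : List Int) (target_set : List Int) (g : Int), Dom_dp_tight_max digits target_set g → Pre_dp_tight_max digits target_set g → Spec_dp_tight_max digits target_set g (dp_tight_max digits target_set g)

-- ===== LEMMAS AND PROOFS =====

-- ---- option max / add algebra (None = unreachable) ----
def omaxU : Option Int → Option Int → Option Int
  | none, b => b
  | some a, none => some a
  | some a, some b => some (max a b)

def oadd (c : Int) : Option Int → Option Int
  | none => none
  | some v => some (c + v)

def oplus : Option Int → Option Int → Option Int
  | none, _ => none
  | some _, none => none
  | some c, some v => some (c + v)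

def obest {α : Type} (f : α → Option Int) (l : List α) : Option Int :=
  l.foldl (fun b x => omaxU b (f x)) none

lemma omaxU_none_right (a : Option Int) : omaxU a none = a := by cases a <;> rfl

lemma omaxU_comm (a b : Option Int) : omaxU a b = omaxU b a := by
  cases a <;> cases b <;> simp [omaxU, max_comm]

lemma omaxU_assoc (a b c : Option Int) : omaxU (omaxU a b) c = omaxU a (omaxU b c) := by
  cases a <;> cases b <;> cases c <;> simp [omaxU, max_assoc]

lemma oadd_omaxU (c : Int) (a b : Option Int) :
    oadd c (omaxU a b) = omaxU (oadd c a) (oadd c b) := by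
  cases a <;> cases b <;> simp [omaxU, oadd, max_add_add_left]

lemma oadd_oadd (c d : Int) (x : Option Int) : oadd c (oadd d x) = oadd (c + d) x := by
  cases x <;> simp [oadd, add_assoc]

lemma oadd_zero (x : Option Int) : oadd 0 x = x := by cases x <;> simp [oadd]

lemma oplus_some (c : Int) (x : Option Int) : oplus (some c) x = oadd c x := by
  cases x <;> rfl

lemma oplus_none_right (x : Option Int) : oplus x none = none := by cases x <;> rfl

lemma oplus_some_zero (x : Option Int) : oplus x (some 0) = x := by
  cases x <;> simp [oplus]

lemma oplus_omaxU_left (a b c : Option Int) :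
    oplus (omaxU a b) c = omaxU (oplus a c) (oplus b c) := by
  cases a <;> cases b <;> cases c <;> simp [omaxU, oplus, max_add_add_right]

lemma obest_acc {α : Type} (f : α → Option Int) (l : List α) (a : Option Int) :
    l.foldl (fun b x => omaxU b (f x)) a = omaxU a (obest f l) := by
  induction l generalizing a with
  | nil => simp [obest, omaxU_none_right]
  | cons x l ih =>
    show l.foldl _ (omaxU a (f x)) = omaxU a (obest f (x :: l))
    rw [ih]
    have : obest f (x :: l) = omaxU (f x) (obest f l) := by
      show l.foldl _ (omaxU none (f x)) = _
      rw [ih]; rfl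
    rw [this, omaxU_assoc]

lemma obest_cons {α : Type} (f : α → Option Int) (x : α) (l : List α) :
    obest f (x :: l) = omaxU (f x) (obest f l) := by
  show l.foldl _ (omaxU none (f x)) = _
  rw [obest_acc]; rfl

lemma obest_append {α : Type} (f : α → Option Int) (l1 l2 : List α) :
    obest f (l1 ++ l2) = omaxU (obest f l1) (obest f l2) := by
  show (l1 ++ l2).foldl _ none = _
  rw [List.foldl_append, obest_acc]; rfl

lemma obest_singleton {α : Type} (f : α → Option Int) (a : α) : obest f [a] = f a := rfl

lemma obest_map {α β : Type} (f : β → Option Int) (h : α → β) (l : List α) :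
    obest f (l.map h) = obest (fun x => f (h x)) l := by
  unfold obest; rw [List.foldl_map]

lemma obest_flatMap {α β : Type} (f : β → Option Int) (h : α → List β) (l : List α) :
    obest f (l.flatMap h) = obest (fun x => obest f (h x)) l := by
  induction l with
  | nil => rfl
  | cons x l ih =>
    rw [List.flatMap_cons, obest_append, ih, obest_cons]

lemma obest_congr {α : Type} (f f' : α → Option Int) (l : List α)
    (h : ∀ x ∈ l, f x = f' x) : obest f l = obest f' l := by
  induction l with
  | nil => rfl
  | cons x l ih =>
    rw [obest_cons, obest_cons, h x List.mem_cons_self,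
      ih (fun y hy => h y (List.mem_cons_of_mem _ hy))]

lemma obest_none {α : Type} (f : α → Option Int) (l : List α)
    (h : ∀ x ∈ l, f x = none) : obest f l = none := by
  induction l with
  | nil => rfl
  | cons x l ih =>
    rw [obest_cons, h x List.mem_cons_self,
      ih (fun y hy => h y (List.mem_cons_of_mem _ hy))]
    rfl

lemma oadd_obest {α : Type} (c : Int) (f : α → Option Int) (l : List α) :
    oadd c (obest f l) = obest (fun x => oadd c (f x)) l := by
  induction l with
  | nil => rfl
  | cons x l ih => rw [obest_cons, obest_cons, oadd_omaxU, ih]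

lemma oplus_obest_left {α : Type} (f : α → Option Int) (l : List α) (c : Option Int) :
    oplus (obest f l) c = obest (fun x => oplus (f x) c) l := by
  induction l with
  | nil => rfl
  | cons x l ih => rw [obest_cons, obest_cons, oplus_omaxU_left, ih]

-- ---- group a best over (key, value) pairs by key ----
def pvValsAt {κ : Type} [DecidableEq κ] (U : List (κ × Int)) (k : κ) : List Int :=
  U.filterMap (fun kv => if kv.1 = k then some kv.2 else none)

lemma pvMem_valsAt {κ : Type} [DecidableEq κ] (U : List (κ × Int)) (k : κ) (v : Int) :
    v ∈ pvValsAt U k ↔ (k, v) ∈ U := by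
  simp only [pvValsAt, List.mem_filterMap]
  constructor
  · rintro ⟨⟨k', v'⟩, h, he⟩
    by_cases hk : k' = k
    · simp [hk] at he; subst hk; simpa [he.symm] using h
    · simp [hk] at he
  · intro h; exact ⟨(k, v), h, by simp⟩

lemma obest_extract {κ : Type} [DecidableEq κ] (SL : List κ) (s0 : κ) (x : Option Int)
    (h : κ → Option Int) (hnd : SL.Nodup) (hmem : s0 ∈ SL) :
    obest (fun s => if s = s0 then omaxU x (h s) else h s) SL = omaxU x (obest h SL) := by
  induction SL with
  | nil => cases hmem
  | cons a l ih =>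
    rw [List.nodup_cons] at hnd
    rw [obest_cons, obest_cons]
    by_cases he : s0 = a
    · subst he
      rw [if_pos rfl]
      have hcong : obest (fun s => if s = s0 then omaxU x (h s) else h s) l = obest h l := by
        apply obest_congr
        intro s hs
        exact if_neg (fun hc : s = s0 => hnd.1 (by rwa [hc] at hs))
      rw [hcong, omaxU_assoc]
    · rcases List.mem_cons.mp hmem with hm | hm
      · exact absurd hm he
      · rw [if_neg (fun hc => he hc.symm), ih hnd.2 hm, ← omaxU_assoc,
          omaxU_comm (h a) x, omaxU_assoc]

lemma obest_regroup {κ : Type} [DecidableEq κ] (SL : List κ) (U : List (κ × Int))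
    (F : κ → Int → Option Int) (hnd : SL.Nodup) (hkeys : ∀ kv ∈ U, kv.1 ∈ SL) :
    obest (fun s => obest (fun v => F s v) (pvValsAt U s)) SL
      = obest (fun kv => F kv.1 kv.2) U := by
  induction U with
  | nil =>
    rw [show obest (fun kv : κ × Int => F kv.1 kv.2) [] = none from rfl]
    apply obest_none
    intro s _
    rfl
  | cons kv U ih =>
    have hk : kv.1 ∈ SL := hkeys kv List.mem_cons_self
    have hvals : ∀ s, pvValsAt (kv :: U) s =
        if s = kv.1 then kv.2 :: pvValsAt U s else pvValsAt U s := by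
      intro s
      by_cases hc : kv.1 = s
      · simp [pvValsAt, hc]
      · have hc' : ¬ s = kv.1 := fun h => hc h.symm
        simp [pvValsAt, hc, hc']
    have hcong : obest (fun s => obest (fun v => F s v) (pvValsAt (kv :: U) s)) SL
        = obest (fun s => if s = kv.1 then omaxU (F kv.1 kv.2)
            (obest (fun v => F s v) (pvValsAt U s))
          else obest (fun v => F s v) (pvValsAt U s)) SL := by
      apply obest_congr
      intro s _
      rw [hvals s]
      by_cases hc : s = kv.1
      · subst hc; rw [if_pos rfl, if_pos rfl, obest_cons]
      · rw [if_neg hc, if_neg hc]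
    rw [hcong, obest_extract SL kv.1 _ _ hnd hk,
      ih (fun x hx => hkeys x (List.mem_cons_of_mem _ hx)), obest_cons]

-- ---- A's dp cells as a best over an explicit update list ----
def pvValidKey (g : Int) (k : Int × Int) : Prop :=
  (k.1 = 0 ∨ k.1 = 1) ∧ 0 ≤ k.2 ∧ k.2 < g

def pvShape (g : Int) (tbl : List (List Int)) : Prop :=
  tbl.length = 2 ∧ ∀ row ∈ tbl, row.length = g.toNat

def pvTbl0 (g : Int) : List (List Int) :=
  [List.replicate g.toNat (-1000000000), List.replicate g.toNat (-1000000000)]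

lemma pvRow_len (g : Int) (tbl : List (List Int)) (t : Int) (h : pvShape g tbl)
    (ht : t = 0 ∨ t = 1) : (tbl.getD t.toNat []).length = g.toNat := by
  obtain ⟨h1, h2⟩ := h
  have htl : t.toNat < tbl.length := by rcases ht with h | h <;> subst h <;> omega
  rw [List.getD_eq_getElem?_getD, List.getElem?_eq_getElem htl]
  exact h2 _ (List.getElem_mem htl)

lemma pvShape_set (g : Int) (tbl : List (List Int)) (t r v : Int)
    (h : pvShape g tbl) (ht : t = 0 ∨ t = 1) : pvShape g (pvSet2 tbl t r v) := by
  have hlen := pvRow_len g tbl t h ht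
  obtain ⟨h1, h2⟩ := h
  refine ⟨by simp [pvSet2, h1], ?_⟩
  intro row hrow
  rcases List.mem_or_eq_of_mem_set hrow with hm | hm
  · exact h2 _ hm
  · subst hm; rw [List.length_set]; exact hlen

lemma pvGet_set (g : Int) (tbl : List (List Int)) (t r v t' r' : Int)
    (h : pvShape g tbl) (hk : pvValidKey g (t, r)) (hk' : pvValidKey g (t', r')) :
    pvGet2 (pvSet2 tbl t r v) t' r' = if (t', r') = (t, r) then v else pvGet2 tbl t' r' := by
  obtain ⟨ht, hr0, hr1⟩ := hk
  obtain ⟨ht', hr0', hr1'⟩ := hk'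
  simp only at ht hr0 hr1 ht' hr0' hr1'
  have hrow := pvRow_len g tbl t h ht
  obtain ⟨h1, h2⟩ := h
  have htl : t.toNat < tbl.length := by rcases ht with h | h <;> subst h <;> omega
  have hrl : r.toNat < (tbl.getD t.toNat []).length := by rw [hrow]; omega
  by_cases he : t' = t
  · subst he
    have e1 : pvGet2 (pvSet2 tbl t' r v) t' r' =
        ((tbl.getD t'.toNat []).set r.toNat v).getD r'.toNat (-1000000000) := by
      simp [pvGet2, pvSet2, List.getD_eq_getElem?_getD, List.getElem?_set_self htl]
    rw [e1]
    by_cases hre : r' = r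
    · subst hre
      rw [List.getD_eq_getElem?_getD,
        List.getElem?_set_self (by simpa [List.getD_eq_getElem?_getD] using hrl)]
      simp
    · have hne : r.toNat ≠ r'.toNat := by omega
      simp [pvGet2, List.getD_eq_getElem?_getD, List.getElem?_set_ne hne, hre]
  · have hne : t.toNat ≠ t'.toNat := by rcases ht with h | h <;> rcases ht' with h' | h' <;> omega
    simp [pvGet2, pvSet2, List.getD_eq_getElem?_getD, List.getElem?_set_ne hne, he]

lemma pvShape_tbl0 (g : Int) : pvShape g (pvTbl0 g) := by
  constructor <;> simp [pvTbl0]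

lemma pvGet_tbl0 (g : Int) (t r : Int) (hk : pvValidKey g (t, r)) :
    pvGet2 (pvTbl0 g) t r = -1000000000 := by
  obtain ⟨ht, hr0, hr1⟩ := hk
  simp only at ht hr0 hr1
  have hr : r.toNat < g.toNat := by omega
  rcases ht with h | h <;> subst h <;>
    simp [pvTbl0, pvGet2, List.getD_eq_getElem?_getD, hr]

def pvRelaxA (tbl : List (List Int)) (kv : (Int × Int) × Int) : List (List Int) :=
  if kv.2 > pvGet2 tbl kv.1.1 kv.1.2 then pvSet2 tbl kv.1.1 kv.1.2 kv.2 else tbl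

lemma pvShape_relaxA (g : Int) (tbl : List (List Int)) (kv : (Int × Int) × Int)
    (h : pvShape g tbl) (hk : pvValidKey g kv.1) : pvShape g (pvRelaxA tbl kv) := by
  unfold pvRelaxA
  split
  · exact pvShape_set g tbl _ _ _ h hk.1
  · exact h

lemma pvGet_relaxA (g : Int) (tbl : List (List Int)) (kv : (Int × Int) × Int)
    (h : pvShape g tbl) (hk : pvValidKey g kv.1) (t r : Int) (hk' : pvValidKey g (t, r)) :
    pvGet2 (pvRelaxA tbl kv) t r =
      if kv.1 = (t, r) then max (pvGet2 tbl t r) kv.2 else pvGet2 tbl t r := by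
  unfold pvRelaxA
  split
  next hgt =>
    have hset := pvGet_set g tbl kv.1.1 kv.1.2 kv.2 t r h (by simpa using hk) hk'
    rw [hset]
    by_cases he : kv.1 = (t, r)
    · rw [if_pos (by simp [he.symm]), if_pos he]
      rw [show kv.1.1 = t by rw [he], show kv.1.2 = r by rw [he]] at hgt
      exact (max_eq_right (le_of_lt hgt)).symm
    · rw [if_neg (by simpa [Prod.ext_iff, eq_comm] using he), if_neg he]
  next hgt =>
    by_cases he : kv.1 = (t, r)
    · rw [if_pos he]
      rw [show kv.1.1 = t by rw [he], show kv.1.2 = r by rw [he]] at hgt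
      exact (max_eq_left (le_of_not_gt hgt)).symm
    · rw [if_neg he]

lemma pvFoldA_get (g : Int) (U : List ((Int × Int) × Int))
    (hU : ∀ kv ∈ U, pvValidKey g kv.1) (tbl : List (List Int)) (h : pvShape g tbl)
    (t r : Int) (hk : pvValidKey g (t, r)) :
    pvGet2 (U.foldl pvRelaxA tbl) t r = (pvValsAt U (t, r)).foldl max (pvGet2 tbl t r) := by
  induction U generalizing tbl with
  | nil => rfl
  | cons kv U ih =>
    have hkv := hU kv List.mem_cons_self
    have hU' : ∀ x ∈ U, pvValidKey g x.1 := fun x hx => hU x (List.mem_cons_of_mem _ hx)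
    have hsh := pvShape_relaxA g tbl kv h hkv
    rw [List.foldl_cons, ih hU' _ hsh]
    rw [pvGet_relaxA g tbl kv h hkv t r hk]
    by_cases he : kv.1 = (t, r)
    · simp [pvValsAt, he]
    · simp [pvValsAt, he]

lemma pvFoldlMaxOut (l : List Int) : ∀ (a b : Int),
    l.foldl max (max a b) = max b (l.foldl max a) := by
  induction l with
  | nil => intro a b; simp [max_comm]
  | cons c l ih =>
    intro a b
    show l.foldl max (max (max a b) c) = max b (l.foldl max (max a c))
    rw [show max (max a b) c = max (max a c) b by
      rw [max_assoc, max_comm b c, ← max_assoc], ih]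

lemma pvObest_some_of_nonneg (vals : List Int) (h : ∀ v ∈ vals, 0 ≤ v) :
    (if 0 ≤ vals.foldl max (-1000000000) then some (vals.foldl max (-1000000000)) else none)
      = obest some vals := by
  induction vals with
  | nil => rfl
  | cons v vs ih =>
    have hv := h v List.mem_cons_self
    have hvs : ∀ x ∈ vs, 0 ≤ x := fun x hx => h x (List.mem_cons_of_mem _ hx)
    rw [obest_cons, ← ih hvs]
    have hout : (v :: vs).foldl max (-1000000000) = max v (vs.foldl max (-1000000000)) := by
      show vs.foldl max (max (-1000000000) v) = _
      rw [pvFoldlMaxOut]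
    rw [hout]
    by_cases hc : 0 ≤ vs.foldl max (-1000000000)
    · rw [if_pos hc, if_pos (le_trans hc (le_max_right _ _))]
      rfl
    · rw [if_neg hc, if_pos (le_trans hv (le_max_left _ _)), max_eq_left (by omega)]
      rfl

-- ---- the two Pythons' common semantics: backward value functions ----
def pvW (target_set : List Int) (d : Int) : Int := if d ∈ target_set then 1 else 0

-- best count over k free digits 0..9 entering with remainder r, reaching remainder 0
def pvFree (target_set : List Int) (g : Int) : Nat → Int → Option Int
  | 0, r => if r = 0 then some 0 else none
  | k + 1, r => obest (fun d => oadd (pvW target_set d)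
      (pvFree target_set g k (PySem.Int.mod (r * 10 + d) g))) (PySem.List.pyRange 0 10 1)

-- best count over the remaining digits under the tight bound
def pvTight (target_set : List Int) (g : Int) : List Int → Bool → Int → Option Int
  | [], _, r => if r = 0 then some 0 else none
  | m :: rest, first, r =>
    let lo : Int := if first then 1 else 0
    let br := obest (fun d => oadd (pvW target_set d)
        (pvFree target_set g rest.length (PySem.Int.mod (r * 10 + d) g)))
      (PySem.List.pyRange lo m 1)
    if m < lo then br
    else omaxU br (oadd (pvW target_set m)
      (pvTight target_set g rest false (PySem.Int.mod (r * 10 + m) g)))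

def pvCellO (dp : List (List Int)) (t r : Int) : Option Int :=
  if 0 ≤ pvGet2 dp t r then some (pvGet2 dp t r) else none

def pvSL (g : Int) : List (Int × Int) :=
  [(0 : Int), 1].flatMap (fun t => (PySem.List.pyRange 0 g 1).map (fun r => (t, r)))

def pvSuf (target_set : List Int) (g : Int) (rest : List Int) (s : Int × Int) : Option Int :=
  if s.1 = 1 then pvTight target_set g rest false s.2 else pvFree target_set g rest.length s.2

def pvPay (target_set : List Int) (g : Int) (dp : List (List Int)) (rest : List Int) :
    Option Int :=
  obest (fun s => oplus (pvCellO dp s.1 s.2) (pvSuf target_set g rest s)) (pvSL g)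

lemma pvSL_mem (g : Int) (s : Int × Int) : s ∈ pvSL g ↔ pvValidKey g s := by
  obtain ⟨t, r⟩ := s
  unfold pvSL pvValidKey
  simp [PySem.List.mem_pyRange_one, Prod.ext_iff, eq_comm]
  aesop

lemma pvSL_nodup (g : Int) : (pvSL g).Nodup := by
  unfold pvSL
  simp only [List.flatMap_cons, List.flatMap_nil, List.append_nil]
  apply List.Nodup.append
  · exact (PySem.List.nodup_pyRange_one 0 g).map (fun a b h => by simpa using h)
  · exact (PySem.List.nodup_pyRange_one 0 g).map (fun a b h => by simpa using h)
  · intro x hx hy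
    simp only [List.mem_map] at hx hy
    obtain ⟨a, _, rfl⟩ := hx
    obtain ⟨b, _, he⟩ := hy
    simp at he

lemma pvCell_foldA (g : Int) (U : List ((Int × Int) × Int))
    (hval : ∀ kv ∈ U, pvValidKey g kv.1) (hnn : ∀ kv ∈ U, 0 ≤ kv.2)
    (s : Int × Int) (hk : pvValidKey g s) :
    pvCellO (U.foldl pvRelaxA (pvTbl0 g)) s.1 s.2 = obest some (pvValsAt U s) := by
  obtain ⟨t, r⟩ := s
  unfold pvCellO
  rw [pvFoldA_get g U hval _ (pvShape_tbl0 g) t r hk, pvGet_tbl0 g t r hk]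
  exact pvObest_some_of_nonneg _ (fun v hv => hnn _ ((pvMem_valsAt U (t, r) v).1 hv))

lemma pvPayFold (target_set : List Int) (g : Int) (U : List ((Int × Int) × Int))
    (hval : ∀ kv ∈ U, pvValidKey g kv.1) (hnn : ∀ kv ∈ U, 0 ≤ kv.2)
    (F : Int × Int → Option Int) :
    obest (fun s => oplus (pvCellO (U.foldl pvRelaxA (pvTbl0 g)) s.1 s.2) (F s)) (pvSL g)
      = obest (fun kv => oadd kv.2 (F kv.1)) U := by
  have h1 : obest (fun s => oplus (pvCellO (U.foldl pvRelaxA (pvTbl0 g)) s.1 s.2) (F s)) (pvSL g)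
      = obest (fun s => obest (fun v => oplus (some v) (F s)) (pvValsAt U s)) (pvSL g) := by
    apply obest_congr
    intro s hs
    rw [pvCell_foldA g U hval hnn s ((pvSL_mem g s).1 hs), oplus_obest_left]
  rw [h1, obest_regroup (pvSL g) U (fun k v => oplus (some v) (F k)) (pvSL_nodup g)
    (fun kv hkv => (pvSL_mem g kv.1).2 (hval kv hkv))]
  apply obest_congr
  intro kv _
  exact oplus_some kv.2 (F kv.1)

-- ---- A's loops as folds over explicit update lists (first digit / body) ----
def pvU1A (digits : List Int) (target_set : List Int) (g : Int) : List ((Int × Int) × Int) :=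
  (PySem.List.pyRange 1 ((digits.getD 0 0) + 1) 1).map (fun d =>
    (((if d = digits.getD 0 0 then (1 : Int) else 0), PySem.Int.mod d g),
      if d ∈ target_set then (1 : Int) else 0))

def pvUA (target_set : List Int) (g maxd : Int) (dp : List (List Int)) :
    List ((Int × Int) × Int) :=
  [(0 : Int), 1].flatMap (fun t =>
    (PySem.List.pyRange 0 g 1).flatMap (fun rem =>
      if pvGet2 dp t rem < 0 then []
      else (PySem.List.pyRange 0 ((if t = 1 then maxd else 9) + 1) 1).map (fun dig =>
        (((if t = 1 ∧ dig = (if t = 1 then maxd else 9) then (1 : Int) else 0),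
          PySem.Int.mod (rem * 10 + dig) g),
         pvGet2 dp t rem + (if dig ∈ target_set then 1 else 0)))))

lemma pvAFirst_eq (digits target_set : List Int) (g : Int) :
    pvAFirst digits target_set g = (pvU1A digits target_set g).foldl pvRelaxA (pvTbl0 g) := by
  unfold pvAFirst pvU1A pvTbl0
  rw [List.foldl_map]
  rfl

lemma pvAStep_eq (digits target_set : List Int) (g : Int) (dp : List (List Int)) (pos : Int) :
    pvAStep digits target_set g dp pos =
      (pvUA target_set g (digits.getD pos.toNat 0) dp).foldl pvRelaxA (pvTbl0 g) := by
  unfold pvAStep pvUA pvTbl0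
  rw [List.foldl_flatMap]
  apply PySem.List.foldl_congr_mem
  intro acc t _
  rw [List.foldl_flatMap]
  apply PySem.List.foldl_congr_mem
  intro acc2 rem _
  by_cases hcur : pvGet2 dp t rem < 0
  · simp only [hcur, if_pos, List.foldl_nil]
  · simp only [hcur, if_neg, not_false_iff]
    rw [List.foldl_map]
    rfl

lemma pvU1A_valid (digits target_set : List Int) (g : Int) (hg : 1 ≤ g) :
    ∀ kv ∈ pvU1A digits target_set g, pvValidKey g kv.1 := by
  intro kv hkv
  simp only [pvU1A, List.mem_map] at hkv
  obtain ⟨d, _, rfl⟩ := hkv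
  exact ⟨Or.symm (ite_eq_or_eq _ 1 0), PySem.Int.mod_nonneg _ hg, PySem.Int.mod_lt _ hg⟩

lemma pvU1A_nonneg (digits target_set : List Int) (g : Int) :
    ∀ kv ∈ pvU1A digits target_set g, 0 ≤ kv.2 := by
  intro kv hkv
  simp only [pvU1A, List.mem_map] at hkv
  obtain ⟨d, _, rfl⟩ := hkv
  simp only
  split <;> omega

lemma pvUA_valid (target_set : List Int) (g maxd : Int) (dp : List (List Int)) (hg : 1 ≤ g) :
    ∀ kv ∈ pvUA target_set g maxd dp, pvValidKey g kv.1 := by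
  intro kv hkv
  simp only [pvUA, List.mem_flatMap] at hkv
  obtain ⟨t, ht, rem, hrem, hmem⟩ := hkv
  rw [List.mem_ite_nil_left] at hmem
  obtain ⟨hcur, hmem2⟩ := hmem
  rw [List.mem_map] at hmem2
  obtain ⟨dig, hdig, rfl⟩ := hmem2
  exact ⟨Or.symm (ite_eq_or_eq _ 1 0), PySem.Int.mod_nonneg _ hg, PySem.Int.mod_lt _ hg⟩

lemma pvUA_nonneg (target_set : List Int) (g maxd : Int) (dp : List (List Int)) :
    ∀ kv ∈ pvUA target_set g maxd dp, 0 ≤ kv.2 := by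
  intro kv hkv
  simp only [pvUA, List.mem_flatMap] at hkv
  obtain ⟨t, ht, rem, hrem, hmem⟩ := hkv
  rw [List.mem_ite_nil_left] at hmem
  obtain ⟨hcur, hmem2⟩ := hmem
  rw [List.mem_map] at hmem2
  obtain ⟨dig, hdig, rfl⟩ := hmem2
  simp only
  split <;> omega

-- ---- the key rephrasing: Tight as one fold over digits lo..m ----
lemma pvTight_fold (target_set : List Int) (g : Int) (rest : List Int) (m r : Int)
    (first : Bool) (hm : ¬ m < (if first then (1 : Int) else 0)) :
    obest (fun d => oadd (pvW target_set d)
        (if d = m then pvTight target_set g rest false (PySem.Int.mod (r * 10 + d) g)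
         else pvFree target_set g rest.length (PySem.Int.mod (r * 10 + d) g)))
      (PySem.List.pyRange (if first then (1 : Int) else 0) (m + 1) 1)
      = pvTight target_set g (m :: rest) first r := by
  have hlo : (if first then (1 : Int) else 0) ≤ m := not_lt.mp hm
  rw [PySem.List.pyRange_one_append _ m _ hlo (by omega), PySem.List.pyRange_one_singleton,
    obest_append, obest_singleton, if_pos rfl]
  have hbr : obest (fun d => oadd (pvW target_set d)
        (if d = m then pvTight target_set g rest false (PySem.Int.mod (r * 10 + d) g)
         else pvFree target_set g rest.length (PySem.Int.mod (r * 10 + d) g)))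
      (PySem.List.pyRange (if first then (1 : Int) else 0) m 1)
      = obest (fun d => oadd (pvW target_set d)
          (pvFree target_set g rest.length (PySem.Int.mod (r * 10 + d) g)))
        (PySem.List.pyRange (if first then (1 : Int) else 0) m 1) := by
    apply obest_congr
    intro d hd
    rw [if_neg (by have := (PySem.List.mem_pyRange_one.mp hd).2; omega)]
  rw [hbr]
  rw [show pvTight target_set g (m :: rest) first r
      = (if m < (if first then (1 : Int) else 0) then
          obest (fun d => oadd (pvW target_set d)
            (pvFree target_set g rest.length (PySem.Int.mod (r * 10 + d) g)))
            (PySem.List.pyRange (if first then (1 : Int) else 0) m 1)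
        else omaxU (obest (fun d => oadd (pvW target_set d)
            (pvFree target_set g rest.length (PySem.Int.mod (r * 10 + d) g)))
            (PySem.List.pyRange (if first then (1 : Int) else 0) m 1))
          (oadd (pvW target_set m)
            (pvTight target_set g rest false (PySem.Int.mod (r * 10 + m) g)))) from rfl]
  rw [if_neg hm]

-- ---- the exchange: one forward step of A preserves the total payoff ----
lemma pvStep_pay (digits target_set : List Int) (g : Int) (hg : 1 ≤ g)
    (dp : List (List Int)) (pos : Int) (rest : List Int) :
    pvPay target_set g (pvAStep digits target_set g dp pos) rest
      = pvPay target_set g dp ((digits.getD pos.toNat 0) :: rest) := by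
  set m := digits.getD pos.toNat 0 with hmdef
  unfold pvPay
  rw [pvAStep_eq,
    pvPayFold target_set g _ (pvUA_valid target_set g m dp hg) (pvUA_nonneg target_set g m dp)
      (pvSuf target_set g rest)]
  unfold pvUA pvSL
  rw [obest_flatMap, obest_flatMap]
  apply obest_congr
  intro t ht
  rw [obest_flatMap, obest_map]
  apply obest_congr
  intro rem hrem
  by_cases hcur : pvGet2 dp t rem < 0
  · rw [if_pos hcur]
    rw [show pvCellO dp t rem = none from by unfold pvCellO; rw [if_neg (by omega)]]
    rfl
  · rw [if_neg hcur, obest_map]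
    rw [show pvCellO dp t rem = some (pvGet2 dp t rem) from by
      unfold pvCellO; rw [if_pos (by omega)]]
    rw [oplus_some]
    have ht' : t = 0 ∨ t = 1 := by simpa using ht
    rcases ht' with h | h <;> subst h
    · -- not-tight row: limit 9
      have hfun : obest (fun dig =>
          oadd (((((if (0 : Int) = 1 ∧ dig = (if (0 : Int) = 1 then m else 9) then (1 : Int) else 0),
              PySem.Int.mod (rem * 10 + dig) g),
              pvGet2 dp 0 rem + (if dig ∈ target_set then 1 else 0))).2)
            (pvSuf target_set g rest (((((if (0 : Int) = 1 ∧ dig = (if (0 : Int) = 1 then m else 9)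
              then (1 : Int) else 0), PySem.Int.mod (rem * 10 + dig) g),
              pvGet2 dp 0 rem + (if dig ∈ target_set then 1 else 0))).1)))
          (PySem.List.pyRange 0 ((if (0 : Int) = 1 then m else 9) + 1) 1)
          = obest (fun dig => oadd (pvGet2 dp 0 rem) (oadd (pvW target_set dig)
              (pvFree target_set g rest.length (PySem.Int.mod (rem * 10 + dig) g))))
            (PySem.List.pyRange 0 10 1) := by
        rw [show ((if (0 : Int) = 1 then m else 9) + 1) = (10 : Int) by norm_num]
        apply obest_congr
        intro dig _
        simp only [show ¬((0 : Int) = 1) from by norm_num, false_and, if_false, oadd_oadd]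
        rw [show pvSuf target_set g rest ((0 : Int), PySem.Int.mod (rem * 10 + dig) g)
            = pvFree target_set g rest.length (PySem.Int.mod (rem * 10 + dig) g) from by
          unfold pvSuf; norm_num]
        rfl
      rw [hfun, ← oadd_obest]
      congr 1
    · -- tight row: limit m
      rw [show pvSuf target_set g (m :: rest) ((1 : Int), rem)
          = pvTight target_set g (m :: rest) false rem from by unfold pvSuf; norm_num]
      by_cases hm : m < 0
      · rw [PySem.List.pyRange_one_eq_nil (by simp; omega)]
        rw [show pvTight target_set g (m :: rest) false rem
            = (if m < (if false then (1 : Int) else 0) then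
                obest (fun d => oadd (pvW target_set d)
                  (pvFree target_set g rest.length (PySem.Int.mod (rem * 10 + d) g)))
                  (PySem.List.pyRange (if false then (1 : Int) else 0) m 1)
              else omaxU (obest (fun d => oadd (pvW target_set d)
                  (pvFree target_set g rest.length (PySem.Int.mod (rem * 10 + d) g)))
                  (PySem.List.pyRange (if false then (1 : Int) else 0) m 1))
                (oadd (pvW target_set m)
                  (pvTight target_set g rest false (PySem.Int.mod (rem * 10 + m) g)))) from rfl]
        simp only [Bool.false_eq_true, if_false]
        rw [if_pos hm, PySem.List.pyRange_one_eq_nil (le_of_lt hm)]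
        rfl
      · have hfun : obest (fun dig =>
            oadd (((((if (1 : Int) = 1 ∧ dig = (if (1 : Int) = 1 then m else 9) then (1 : Int) else 0),
                PySem.Int.mod (rem * 10 + dig) g),
                pvGet2 dp 1 rem + (if dig ∈ target_set then 1 else 0))).2)
              (pvSuf target_set g rest (((((if (1 : Int) = 1 ∧ dig = (if (1 : Int) = 1 then m else 9)
                then (1 : Int) else 0), PySem.Int.mod (rem * 10 + dig) g),
                pvGet2 dp 1 rem + (if dig ∈ target_set then 1 else 0))).1)))
            (PySem.List.pyRange 0 ((if (1 : Int) = 1 then m else 9) + 1) 1)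
            = obest (fun dig => oadd (pvGet2 dp 1 rem) (oadd (pvW target_set dig)
                (if dig = m then pvTight target_set g rest false (PySem.Int.mod (rem * 10 + dig) g)
                 else pvFree target_set g rest.length (PySem.Int.mod (rem * 10 + dig) g))))
              (PySem.List.pyRange 0 (m + 1) 1) := by
          rw [if_pos rfl]
          apply obest_congr
          intro dig _
          simp only [true_and, oadd_oadd]
          by_cases hc : dig = m
          · simp [pvSuf, pvW, hc]
          · simp [pvSuf, pvW, hc]
        rw [hfun, ← oadd_obest]
        congr 1
        exact pvTight_fold target_set g rest m rem false (by simpa using hm)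

lemma pvFirst_pay (target_set : List Int) (g : Int) (hg : 1 ≤ g) (m0 : Int)
    (rest : List Int) :
    pvPay target_set g (pvAFirst (m0 :: rest) target_set g) rest
      = pvTight target_set g (m0 :: rest) true 0 := by
  unfold pvPay
  rw [pvAFirst_eq,
    pvPayFold target_set g _ (pvU1A_valid _ target_set g hg) (pvU1A_nonneg _ target_set g)
      (pvSuf target_set g rest)]
  unfold pvU1A
  rw [obest_map]
  simp only [List.getD_cons_zero]
  by_cases hm : m0 < 1
  · rw [PySem.List.pyRange_one_eq_nil (by omega),
      show obest (fun d => oadd ((((if d = m0 then (1 : Int) else 0), PySem.Int.mod d g),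
        if d ∈ target_set then (1 : Int) else 0).2)
        (pvSuf target_set g rest (((if d = m0 then (1 : Int) else 0), PySem.Int.mod d g),
          if d ∈ target_set then (1 : Int) else 0).1)) ([] : List Int) = none from rfl]
    rw [show pvTight target_set g (m0 :: rest) true 0
        = (if m0 < (if true then (1 : Int) else 0) then
            obest (fun d => oadd (pvW target_set d)
              (pvFree target_set g rest.length (PySem.Int.mod (0 * 10 + d) g)))
              (PySem.List.pyRange (if true then (1 : Int) else 0) m0 1)
          else omaxU (obest (fun d => oadd (pvW target_set d)
              (pvFree target_set g rest.length (PySem.Int.mod (0 * 10 + d) g)))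
              (PySem.List.pyRange (if true then (1 : Int) else 0) m0 1))
            (oadd (pvW target_set m0)
              (pvTight target_set g rest false (PySem.Int.mod (0 * 10 + m0) g)))) from rfl]
    rw [if_pos (by simpa using hm), PySem.List.pyRange_one_eq_nil (by simp; omega)]
    rfl
  · rw [← pvTight_fold target_set g rest m0 0 true (by simpa using hm)]
    apply obest_congr
    intro d hd
    by_cases hc : d = m0
    · simp [pvSuf, pvW, hc]
    · simp [pvSuf, pvW, hc]

lemma pvPay_final (target_set : List Int) (g : Int) (hg : 1 ≤ g) (dp : List (List Int)) :
    pvPay target_set g dp [] = omaxU (pvCellO dp 0 0) (pvCellO dp 1 0) := by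
  have hinner : ∀ t : Int, t = 0 ∨ t = 1 →
      obest (fun r => oplus (pvCellO dp t r) (pvSuf target_set g [] (t, r)))
        (PySem.List.pyRange 0 g 1) = pvCellO dp t 0 := by
    intro t ht
    rw [PySem.List.pyRange_one_cons (by omega : (0 : Int) < g), obest_cons]
    have h0 : pvSuf target_set g [] (t, 0) = some 0 := by
      rcases ht with h | h <;> subst h <;> simp [pvSuf, pvTight, pvFree]
    rw [h0, oplus_some_zero]
    have hnone : obest (fun r => oplus (pvCellO dp t r) (pvSuf target_set g [] (t, r)))
        (PySem.List.pyRange (0 + 1) g 1) = none := by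
      apply obest_none
      intro r hr
      have hr1 := (PySem.List.mem_pyRange_one.mp hr).1
      have hsuf : pvSuf target_set g [] (t, r) = none := by
        rcases ht with h | h <;> subst h <;> simp [pvSuf, pvTight, pvFree] <;> omega
      rw [hsuf, oplus_none_right]
    rw [hnone, omaxU_none_right]
  unfold pvPay pvSL
  rw [obest_flatMap, obest_cons, obest_cons,
    show obest (fun t => obest (fun s => oplus (pvCellO dp s.1 s.2) (pvSuf target_set g [] s))
      ((PySem.List.pyRange 0 g 1).map (fun r => (t, r)))) ([] : List Int) = none from rfl,
    omaxU_none_right, obest_map, obest_map, hinner 0 (Or.inl rfl), hinner 1 (Or.inr rfl)]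

lemma pvChain (digits target_set : List Int) (g : Int) (hg : 1 ≤ g) :
    ∀ (k : Nat) (q : Int), q = (digits.length : Int) - k → 1 ≤ q → ∀ dp,
      pvPay target_set g
        ((PySem.List.pyRange q (digits.length : Int) 1).foldl (pvAStep digits target_set g) dp) []
        = pvPay target_set g dp (digits.drop q.toNat) := by
  intro k
  induction k with
  | zero =>
    intro q hq h1 dp
    have hrange : PySem.List.pyRange q (digits.length : Int) 1 = [] :=
      PySem.List.pyRange_one_eq_nil (by omega)
    have hqn : q.toNat = digits.length := by omega
    rw [hrange, List.foldl_nil, hqn, List.drop_length]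
  | succ k ih =>
    intro q hq h1 dp
    have hlt : q < (digits.length : Int) := by
      have : ((k : Int) + 1) = ((k + 1 : Nat) : Int) := by push_cast; ring
      omega
    rw [PySem.List.pyRange_one_cons hlt, List.foldl_cons,
      ih (q + 1) (by push_cast at hq ⊢; omega) (by omega) (pvAStep digits target_set g dp q),
      pvStep_pay digits target_set g hg dp q (digits.drop (q + 1).toNat)]
    congr 1
    have hqn : q.toNat < digits.length := by omega
    rw [List.drop_eq_getElem_cons hqn, show (q + 1).toNat = q.toNat + 1 by omega,
      List.getD_eq_getElem digits 0 hqn]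

-- ---- B side: the tables hold pvFree, the walk computes pvTight ----
def pvTableOf (target_set : List Int) (g : Int) (k : Nat) : List (Option Int) :=
  (PySem.List.pyRange 0 g 1).map (fun r => pvFree target_set g k r)

lemma pvBUpd_eq (b : Option Int) (c : Int) (t : Option Int) :
    pvBUpd b c t = omaxU b (oadd c t) := by
  cases t with
  | none => cases b <;> rfl
  | some v =>
    cases b with
    | none => simp [pvBUpd, oadd, omaxU, add_comm]
    | some bb =>
      simp only [pvBUpd, oadd, omaxU]
      split <;> [skip; skip] <;> congr 1 <;> omega

lemma pvLookup (g : Int) (f : Int → Option Int) (r : Int) (h0 : 0 ≤ r) (h1 : r < g) :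
    ((PySem.List.pyRange 0 g 1).map f).getD r.toNat none = f r := by
  have hg : g = ((g.toNat : Nat) : Int) := (Int.toNat_of_nonneg (by omega)).symm
  rw [List.getD_eq_getElem?_getD, hg,
    PySem.List.getElem?_map_pyRange_zero f g.toNat r.toNat (by omega)]
  simp [Int.toNat_of_nonneg h0]

lemma pvBRow_eq (target_set : List Int) (g : Int) (hg : 1 ≤ g) (k : Nat) (r : Int) :
    pvBRow target_set g (pvTableOf target_set g k) r = pvFree target_set g (k + 1) r := by
  unfold pvBRow
  rw [show pvFree target_set g (k + 1) r = obest (fun d => oadd (pvW target_set d)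
      (pvFree target_set g k (PySem.Int.mod (r * 10 + d) g))) (PySem.List.pyRange 0 10 1) from rfl]
  unfold obest
  apply PySem.List.foldl_congr_mem
  intro acc d _
  rw [pvBUpd_eq]
  unfold pvTableOf
  rw [pvLookup g _ _ (PySem.Int.mod_nonneg _ (by omega)) (PySem.Int.mod_lt _ (by omega))]
  rfl

lemma pvBBuild_eq (target_set : List Int) (g : Int) (hg : 1 ≤ g) (k : Nat) :
    pvBBuild target_set g (pvTableOf target_set g k) = pvTableOf target_set g (k + 1) := by
  unfold pvBBuild
  conv_rhs => rw [pvTableOf]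
  exact List.map_congr_left (fun r _ => pvBRow_eq target_set g hg k r)

lemma pvBT_fold (target_set : List Int) (g : Int) (hg : 1 ≤ g) (l : List Int) : ∀ j : Nat,
    l.foldl (fun acc (_ : Int) =>
        let cur := pvBBuild target_set g acc.1
        (cur, acc.2 ++ [cur]))
      (pvTableOf target_set g j, (List.range (j + 1)).map (pvTableOf target_set g))
    = (pvTableOf target_set g (j + l.length),
       (List.range (j + l.length + 1)).map (pvTableOf target_set g)) := by
  induction l with
  | nil => intro j; simp
  | cons x l ih =>
    intro j
    rw [List.foldl_cons]
    dsimp only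
    rw [pvBBuild_eq target_set g hg j]
    have hacc : (List.range (j + 1)).map (pvTableOf target_set g)
        ++ [pvTableOf target_set g (j + 1)]
        = (List.range (j + 1 + 1)).map (pvTableOf target_set g) := by
      simp [List.range_succ]
    rw [hacc, ih (j + 1)]
    have h1 : j + 1 + l.length = j + (x :: l).length := by simp; omega
    rw [h1]

lemma pvBTables_eq (target_set : List Int) (g : Int) (hg : 1 ≤ g) (L : Int) :
    pvBTables target_set g L
      = (List.range ((L - 1).toNat + 1)).map (pvTableOf target_set g) := by
  unfold pvBTables
  have hbase : (PySem.List.pyRange 0 g 1).map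
      (fun r => if r = (0 : Int) then some (0 : Int) else none) = pvTableOf target_set g 0 := by
    unfold pvTableOf
    exact List.map_congr_left (fun r _ => rfl)
  dsimp only
  rw [hbase]
  have h1 : [pvTableOf target_set g 0] = (List.range (0 + 1)).map (pvTableOf target_set g) := by
    simp
  rw [h1, pvBT_fold target_set g hg _ 0]
  simp [PySem.List.length_pyRange_one]

lemma pvWalk_eq (target_set : List Int) (g : Int) (hg : 1 ≤ g) (n : Nat)
    (tables : List (List (Option Int)))
    (htab : tables = (List.range (n + 1)).map (pvTableOf target_set g)) :
    ∀ (suf : List Int) (p : Int) (best : Option Int) (cnt rem : Int), 0 ≤ p →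
      suf.length ≤ n + 1 →
      pvBWalk target_set g tables suf p best cnt rem
        = omaxU best (oadd cnt (pvTight target_set g suf (decide (p = 0)) rem)) := by
  intro suf
  induction suf with
  | nil =>
    intro p best cnt rem hp hlen
    rw [show pvTight target_set g [] (decide (p = 0)) rem
        = if rem = 0 then some 0 else none from rfl]
    show (if rem = 0 then _ else best) = _
    by_cases hr : rem = 0
    · rw [if_pos hr, if_pos hr]
      cases best with
      | none => simp [omaxU, oadd]
      | some bb =>
        simp only [omaxU, oadd, add_zero]
        split
        next h => rw [max_eq_right (le_of_lt h)]
        next h => rw [max_eq_left (by omega)]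
    · rw [if_neg hr, if_neg hr]
      cases best <;> rfl
  | cons m suf ih =>
    intro p best cnt rem hp hlen
    have hT : tables.getD suf.length [] = pvTableOf target_set g suf.length := by
      rw [htab, List.getD_eq_getElem?_getD, List.getElem?_map,
        List.getElem?_range (by simpa using hlen)]
      rfl
    have hlo : (if p = 0 then (1 : Int) else 0) = (if decide (p = 0) then (1 : Int) else 0) := by
      by_cases hc : p = 0 <;> simp [hc]
    have hbest' : ∀ (l : List Int) (b : Option Int),
        l.foldl (fun b d => pvBUpd b (cnt + (if d ∈ target_set then 1 else 0))
          ((tables.getD suf.length []).getD (PySem.Int.mod (rem * 10 + d) g).toNat none)) b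
        = omaxU b (oadd cnt (obest (fun d => oadd (pvW target_set d)
            (pvFree target_set g suf.length (PySem.Int.mod (rem * 10 + d) g))) l)) := by
      intro l b
      have hcong : l.foldl (fun b d => pvBUpd b (cnt + (if d ∈ target_set then 1 else 0))
            ((tables.getD suf.length []).getD (PySem.Int.mod (rem * 10 + d) g).toNat none)) b
          = l.foldl (fun b d => omaxU b (oadd cnt (oadd (pvW target_set d)
              (pvFree target_set g suf.length (PySem.Int.mod (rem * 10 + d) g))))) b := by
        apply PySem.List.foldl_congr_mem
        intro acc d _
        rw [pvBUpd_eq, hT]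
        unfold pvTableOf
        rw [pvLookup g _ _ (PySem.Int.mod_nonneg _ (by omega)) (PySem.Int.mod_lt _ (by omega)),
          oadd_oadd]
        rfl
      rw [hcong]
      rw [show (fun (b : Option Int) (d : Int) => omaxU b (oadd cnt (oadd (pvW target_set d)
            (pvFree target_set g suf.length (PySem.Int.mod (rem * 10 + d) g)))))
          = (fun (b : Option Int) (d : Int) => omaxU b ((fun d => oadd cnt (oadd (pvW target_set d)
            (pvFree target_set g suf.length (PySem.Int.mod (rem * 10 + d) g)))) d)) from rfl,
        obest_acc, oadd_obest]
    show (if m < (if p = 0 then (1 : Int) else 0) then _ else _) = _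
    rw [show pvTight target_set g (m :: suf) (decide (p = 0)) rem
        = (if m < (if decide (p = 0) then (1 : Int) else 0) then
            obest (fun d => oadd (pvW target_set d)
              (pvFree target_set g suf.length (PySem.Int.mod (rem * 10 + d) g)))
              (PySem.List.pyRange (if decide (p = 0) then (1 : Int) else 0) m 1)
          else omaxU (obest (fun d => oadd (pvW target_set d)
              (pvFree target_set g suf.length (PySem.Int.mod (rem * 10 + d) g)))
              (PySem.List.pyRange (if decide (p = 0) then (1 : Int) else 0) m 1))
            (oadd (pvW target_set m)
              (pvTight target_set g suf false (PySem.Int.mod (rem * 10 + m) g)))) from rfl]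
    rw [← hlo]
    by_cases hm : m < (if p = 0 then (1 : Int) else 0)
    · rw [if_pos hm, if_pos hm, hbest']
    · rw [if_neg hm, if_neg hm]
      rw [ih (p + 1) _ _ _ (by omega) (Nat.le_of_succ_le (by simpa using hlen))]
      rw [show decide (p + 1 = 0) = false from decide_eq_false (by omega), hbest',
        omaxU_assoc]
      conv_rhs => rw [oadd_omaxU, oadd_oadd]
      rfl

lemma pvFinalA (a b : Int) :
    (if max a b ≥ 0 then some (max a b) else none)
      = omaxU (if 0 ≤ a then some a else none) (if 0 ≤ b then some b else none) := by
  by_cases ha : 0 ≤ a <;> by_cases hb : 0 ≤ b <;>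
    simp only [ha, hb, if_pos, ite_false, omaxU]
  · rw [if_pos (by have := le_max_left a b; omega)]
  · rw [if_pos (by have := le_max_left a b; omega), max_eq_left (by omega)]
  · rw [if_pos (by have := le_max_right a b; omega), max_eq_right (by omega)]
  · rw [if_neg (by omega)]

lemma pvAlt_tight (digits target_set : List Int) (g : Int) (hg : 1 ≤ g)
    (hne : digits ≠ []) :
    dp_tight_max_alt digits target_set g = pvTight target_set g digits true 0 := by
  have hL : 0 < digits.length := List.length_pos_iff.mpr hne
  unfold dp_tight_max_alt
  rw [pvWalk_eq target_set g hg (((digits.length : Int) - 1).toNat) _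
    (pvBTables_eq target_set g hg _) digits 0 none 0 0 le_rfl (by omega)]
  rw [show decide ((0 : Int) = 0) = true from rfl, oadd_zero]
  rfl

-- ===== VERDICT (by name: the statement is the Claim_ definition above) =====
theorem dp_tight_max_spec : Claim_equal_dp_tight_max := by
  intro digits target_set g _hD hP
  obtain ⟨hne, hg⟩ := hP
  unfold Spec_dp_tight_max
  have hL : 0 < digits.length := List.length_pos_iff.mpr hne
  set dpF := (PySem.List.pyRange 1 (digits.length : Int) 1).foldl
    (pvAStep digits target_set g) (pvAFirst digits target_set g) with hdpF
  have hA : dp_tight_max digits target_set g = omaxU (pvCellO dpF 0 0) (pvCellO dpF 1 0) := by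
    unfold dp_tight_max pvCellO
    rw [← hdpF]
    exact pvFinalA _ _
  have hchain := pvChain digits target_set g hg (digits.length - 1) 1
    (by omega) (by omega) (pvAFirst digits target_set g)
  rw [hA, ← pvPay_final target_set g hg dpF, hdpF, hchain]
  obtain ⟨m0, rest, rfl⟩ : ∃ m0 rest, digits = m0 :: rest := by
    cases digits with
    | nil => exact absurd rfl hne
    | cons a l => exact ⟨a, l, rfl⟩
  rw [show ((1 : Int).toNat) = 1 from rfl, List.drop_one, List.tail_cons,
    pvFirst_pay target_set g hg m0 rest,
    pvAlt_tight (m0 :: rest) target_set g hg hne]
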